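-- pv_equiv track=rewrite | github.com/AdityaManojMenon/Data-Structures-and-Algorithms | Deque/solution.py | maximize_profits
-- ===== SOURCE A (Python) =====
-- from typing import TypeVar, List, Optional
--
-- def maximize_profits(profits: List[int], k: int) -> int:
--     """
--     Calculates the maximum profit that can be achieved by working on certain days, given a constraint of working at least once every 'k' days.
--
--     :param profits: A list of integers representing the profit that can be made on each day.
--     :param k: An integer representing the constraint of needing to work at least once every 'k' days.
--     :return: The maximum profit achievable under the given constraints.
--     """
--     n = len(profits)
--     if n <= 2:
--         return sum(profits)
--
--     # Adjust k for the 1-based index loop below, ensuring we do not exceed the bounds.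
--     k = min(k, n - 1)
--
--     # Dynamic programming array to store the maximum profit until day i.
--     dp = [0] * n
--     dp[0] = profits[0]
--     dp[1] = profits[0] + profits[1]
--
--     for i in range(2, n):
--         # Calculate profit for working on the current day, considering the constraint of working at least once every k days.
--         dp[i] = profits[i] + max(dp[i-1], max(dp[max(0, i-k):i-1]))
--
--     # Ensure to add the profit of the last day.
--     return dp[-1]
-- ===== SOURCE B (Python) =====
-- def maximize_profits(profits, k):
--     """Same result as A, but the sliding-window maximum of dp values is kept in a
--     monotonic deque (list + head pointer), so the whole run is O(n) instead of O(n*k)."""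
--     n = len(profits)
--     if n <= 2:
--         return sum(profits)
--     k = min(k, n - 1)
--     dp = [0] * n
--     dp[0] = profits[0]
--     dp[1] = profits[0] + profits[1]
--     dq = [0]          # indices whose dp values strictly decrease, window candidates
--     h = 0             # head pointer into dq
--     while len(dq) > h and dp[dq[-1]] <= dp[1]:
--         dq.pop()
--     dq.append(1)
--     for i in range(2, n):
--         while dq[h] < i - k:
--             h += 1
--         dp[i] = profits[i] + dp[dq[h]]
--         while len(dq) > h and dp[dq[-1]] <= dp[i]:
--             dq.pop()
--         dq.append(i)
--     return dp[-1]
-- ===== Notes on version B (the rewrite author's own statement) =====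
-- stated objective: faster
-- what changed: B replaces A's per-step rescan max(dp[max(0,i-k):i-1]) with a monotonic deque (index list + head pointer) that maintains the sliding-window maximum of dp, turning O(n*k) into O(n).
import Mathlib
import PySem

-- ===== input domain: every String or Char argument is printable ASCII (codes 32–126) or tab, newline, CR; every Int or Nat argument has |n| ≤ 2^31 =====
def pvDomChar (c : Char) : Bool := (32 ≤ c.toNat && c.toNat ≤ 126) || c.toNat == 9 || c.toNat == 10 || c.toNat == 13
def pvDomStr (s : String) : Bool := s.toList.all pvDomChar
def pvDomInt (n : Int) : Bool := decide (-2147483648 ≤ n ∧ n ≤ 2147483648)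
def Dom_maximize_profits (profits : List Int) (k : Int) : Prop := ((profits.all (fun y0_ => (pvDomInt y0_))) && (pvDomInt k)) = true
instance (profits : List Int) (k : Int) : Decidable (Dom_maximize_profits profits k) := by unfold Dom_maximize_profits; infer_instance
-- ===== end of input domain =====

-- B is the same DP with the sliding-window maximum kept in a monotonic deque (O(n) instead of O(n*k)).

-- ===== PORT A =====
-- loop body of A: dp[i] = profits[i] + max(dp[i-1], max(dp[max(0,i-k):i-1]))
-- (max() of the empty slice raises ValueError; excluded by Pre_)
def pvStepA (profits : List Int) (k : Int) (dp : List Int) (i : Int) : List Int :=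
  let w := (PySem.List.max? (PySem.List.slice dp (some (max 0 (i - k))) (some (i - 1))) (fun x => x)).getD 0
  dp.set i.toNat (PySem.List.pyGetD profits i 0 + max (PySem.List.pyGetD dp (i - 1) 0) w)

def maximize_profits (profits : List Int) (k : Int) : Int :=
  let n : Int := (profits.length : Int)
  if n ≤ 2 then profits.sum
  else
    let k := min k (n - 1)
    let dp : List Int := List.replicate profits.length 0
    let dp := dp.set 0 (PySem.List.pyGetD profits 0 0)
    let dp := dp.set 1 (PySem.List.pyGetD profits 0 0 + PySem.List.pyGetD profits 1 0)
    let dp := (PySem.List.pyRange 2 n 1).foldl (pvStepA profits k) dp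
    PySem.List.pyGetD dp (-1) 0

-- ===== PORT B =====
-- `while dq[h] < i - k: h += 1` — h indexes into dq, so the loop walks dq.drop h
-- (dq[h] with h = len(dq) raises IndexError; excluded by Pre_)
def pvAdvanceHeadAux (bound : Int) : List Int → Nat → Nat
  | [], h => h
  | j :: rest, h => if j < bound then pvAdvanceHeadAux bound rest (h + 1) else h

def pvAdvanceHead (dq : List Int) (bound : Int) (h : Nat) : Nat :=
  pvAdvanceHeadAux bound (dq.drop h) h

-- `while len(dq) > h and dp[dq[-1]] <= v: dq.pop()` — pops from the right end, never below
-- position h: keep the first h entries and pop along the reversed remainder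
def pvPopTailAux (dp : List Int) (v : Int) : List Int → List Int
  | [] => []
  | j :: rest => if PySem.List.pyGetD dp j 0 ≤ v then pvPopTailAux dp v rest else j :: rest

def pvPopTail (dp dq : List Int) (h : Nat) (v : Int) : List Int :=
  dq.take h ++ (pvPopTailAux dp v (dq.drop h).reverse).reverse

-- loop body of B: advance the head past stale indices, read the window max at dq[h],
-- write dp[i], pop dominated tail entries, push i
def pvStepB (profits : List Int) (k : Int) (st : List Int × List Int × Nat) (i : Int) : List Int × List Int × Nat :=
  let dp := st.1
  let dq := st.2.1
  let h := pvAdvanceHead dq (i - k) st.2.2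
  let v := PySem.List.pyGetD profits i 0 +
           PySem.List.pyGetD dp (PySem.List.pyGetD dq (h : Int) 0) 0
  let dp := dp.set i.toNat v
  (dp, pvPopTail dp dq h v ++ [i], h)

def maximize_profits_alt (profits : List Int) (k : Int) : Int :=
  let n : Int := (profits.length : Int)
  if n ≤ 2 then profits.sum
  else
    let k := min k (n - 1)
    let dp : List Int := List.replicate profits.length 0
    let dp := dp.set 0 (PySem.List.pyGetD profits 0 0)
    let dp := dp.set 1 (PySem.List.pyGetD profits 0 0 + PySem.List.pyGetD profits 1 0)
    let dq : List Int := [0]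
    let dq := pvPopTail dp dq 0 (PySem.List.pyGetD dp 1 0)
    let dq := dq ++ [1]
    let st := (PySem.List.pyRange 2 n 1).foldl (pvStepB profits k) (dp, dq, (0 : Nat))
    PySem.List.pyGetD st.1 (-1) 0

-- ===== PRECONDITION & SPEC =====
-- Pre_ excludes exactly the inputs where A raises: for len(profits) ≥ 3 and k ≤ 1 the window
-- slice dp[max(0,i-k):i-1] is empty at i = 2 and Python's max() raises ValueError.
def Pre_maximize_profits (profits : List Int) (k : Int) : Prop :=
  profits.length ≤ 2 ∨ 2 ≤ k
instance (profits : List Int) (k : Int) : Decidable (Pre_maximize_profits profits k) := by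
  unfold Pre_maximize_profits; infer_instance

def pvWitness_maximize_profits : List Int × Int := ([1, -2, 3, 4], 2)

def Spec_maximize_profits (profits : List Int) (k : Int) (out : Int) : Prop :=
  out = maximize_profits_alt profits k
instance (profits : List Int) (k : Int) (out : Int) : Decidable (Spec_maximize_profits profits k out) := by
  unfold Spec_maximize_profits; infer_instance

-- ===== CLAIM (what is proved, stated in full; the proofs are below) =====
def Claim_equal_maximize_profits : Prop := ∀ (profits : List Int) (k : Int), Dom_maximize_profits profits k → Pre_maximize_profits profits k → Spec_maximize_profits profits k (maximize_profits profits k)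

-- ===== LEMMAS AND PROOFS =====

def pvG (dp : List Int) (j : Int) : Int := PySem.List.pyGetD dp j 0
def pvWin (lo b : Int) : List Int := PySem.List.pyRange lo (b + 1) 1
def pvSmx (dp : List Int) : List Int → List Int
  | [] => []
  | j :: rest =>
    match pvSmx dp rest with
    | [] => [j]
    | m :: s => if pvG dp m < pvG dp j then j :: m :: s else m :: s

lemma pvSmx_cons (dp : List Int) (j : Int) (rest : List Int) :
    pvSmx dp (j :: rest) = match pvSmx dp rest with
      | [] => [j]
      | m :: s => if pvG dp m < pvG dp j then j :: m :: s else m :: s := rfl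

lemma pvSmx_cons_nil (dp : List Int) (j : Int) (rest : List Int) (h : pvSmx dp rest = []) :
    pvSmx dp (j :: rest) = [j] := by rw [pvSmx_cons, h]

lemma pvSmx_cons_cons (dp : List Int) (j m : Int) (rest s : List Int) (h : pvSmx dp rest = m :: s) :
    pvSmx dp (j :: rest) = if pvG dp m < pvG dp j then j :: m :: s else m :: s := by
  rw [pvSmx_cons, h]

lemma pvSmx_nil_iff (dp : List Int) (js : List Int) : pvSmx dp js = [] ↔ js = [] := by
  induction js with
  | nil => simp [pvSmx]
  | cons j rest ih =>
    cases h : pvSmx dp rest with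
    | nil => rw [pvSmx_cons_nil dp j rest h]; simp
    | cons m s => rw [pvSmx_cons_cons dp j m rest s h]; split <;> simp

lemma pvSmx_sublist (dp : List Int) (js : List Int) : (pvSmx dp js).Sublist js := by
  induction js with
  | nil => simp [pvSmx]
  | cons j rest ih =>
    cases h : pvSmx dp rest with
    | nil => rw [pvSmx_cons_nil dp j rest h]; simp
    | cons m s =>
      rw [h] at ih
      rw [pvSmx_cons_cons dp j m rest s h]
      split
      · exact ih.cons₂ j
      · exact ih.cons j

lemma pvSmx_head_max (dp : List Int) (js : List Int) : ∀ (m : Int) (s : List Int),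
    pvSmx dp js = m :: s → ∀ j ∈ js, pvG dp j ≤ pvG dp m := by
  induction js with
  | nil => simp [pvSmx]
  | cons j rest ih =>
    intro m s hms x hx
    cases h : pvSmx dp rest with
    | nil =>
      rw [pvSmx_cons_nil dp j rest h] at hms
      have hrest : rest = [] := (pvSmx_nil_iff dp rest).mp h
      subst hrest
      simp at hx; subst hx
      injection hms with h1 h2; subst h1; exact le_refl _
    | cons m' s' =>
      rw [pvSmx_cons_cons dp j m' rest s' h] at hms
      rcases List.mem_cons.mp hx with rfl | hx'
      · split at hms
        · injection hms with h1 h2; subst h1; exact le_refl _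
        · injection hms with h1 h2; subst h1; omega
      · have hle : pvG dp x ≤ pvG dp m' := ih m' s' h x hx'
        split at hms
        · injection hms with h1 h2; subst h1; omega
        · injection hms with h1 h2; subst h1; exact hle

lemma pvSmx_pairwise (dp : List Int) (js : List Int) :
    (pvSmx dp js).Pairwise (fun a b => pvG dp b < pvG dp a) := by
  induction js with
  | nil => simp [pvSmx]
  | cons j rest ih =>
    cases h : pvSmx dp rest with
    | nil => rw [pvSmx_cons_nil dp j rest h]; simp
    | cons m s =>
      rw [h] at ih
      rw [pvSmx_cons_cons dp j m rest s h]
      split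
      · refine List.Pairwise.cons ?_ ih
        intro y hy
        have : pvG dp y ≤ pvG dp m := by
          rcases List.mem_cons.mp hy with rfl | hy'
          · exact le_refl _
          · exact le_of_lt ((List.pairwise_cons.mp ih).1 y hy')
        omega
      · exact ih

lemma pvWin_nil (lo b : Int) (h : b < lo) : pvWin lo b = [] := by
  unfold pvWin; exact PySem.List.pyRange_one_eq_nil (by omega)

lemma pvWin_cons (lo b : Int) (h : lo ≤ b) : pvWin lo b = lo :: pvWin (lo + 1) b := by
  unfold pvWin; exact PySem.List.pyRange_one_cons (by omega)

lemma pvSmx_dropWhile (dp : List Int) (c b : Int) : ∀ (n : Nat) (lo : Int), b + 1 - lo ≤ (n : Int) →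
    (pvSmx dp (pvWin lo b)).dropWhile (fun j => decide (j < c)) = pvSmx dp (pvWin (max lo c) b) := by
  intro n
  induction n with
  | zero =>
    intro lo hlo
    rw [pvWin_nil lo b (by omega), pvWin_nil (max lo c) b (by omega)]
    simp [pvSmx]
  | succ n ih =>
    intro lo hlo
    by_cases hle : b < lo
    · rw [pvWin_nil lo b hle, pvWin_nil (max lo c) b (by omega)]
      simp [pvSmx]
    · by_cases hc : c ≤ lo
      · -- dropWhile removes nothing: every element of smx is ≥ lo ≥ c
        have hmax : max lo c = lo := by omega
        rw [hmax]
        cases hs : pvSmx dp (pvWin lo b) with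
        | nil => simp
        | cons m s =>
          have hm : m ∈ pvWin lo b := (pvSmx_sublist dp (pvWin lo b)).subset (hs ▸ List.mem_cons_self)
          have : lo ≤ m := by
            have := (PySem.List.mem_pyRange_one).mp hm
            omega
          rw [List.dropWhile_cons]
          simp only [decide_eq_true_eq]
          rw [if_neg (by omega)]
      · have hmax : max lo c = c := by omega
        have hmax' : max (lo + 1) c = c := by omega
        rw [pvWin_cons lo b (by omega)]
        have ihx := ih (lo + 1) (by omega)
        rw [hmax'] at ihx
        rw [hmax]
        cases h : pvSmx dp (pvWin (lo + 1) b) with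
        | nil =>
          rw [pvSmx_cons_nil dp lo _ h]
          rw [h] at ihx
          simp only [List.dropWhile_nil] at ihx
          rw [List.dropWhile_cons]
          simp only [decide_eq_true_eq]
          rw [if_pos (by omega)]
          simpa using ihx
        | cons m s =>
          rw [pvSmx_cons_cons dp lo m _ s h]
          rw [h] at ihx
          split
          · rw [List.dropWhile_cons]
            simp only [decide_eq_true_eq]
            rw [if_pos (by omega)]
            exact ihx
          · exact ihx

lemma pvPopTailAux_eq_filter (dp : List Int) (v : Int) (s : List Int)
    (hp : s.Pairwise (fun a b => pvG dp b < pvG dp a)) :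
    (pvPopTailAux dp v s.reverse).reverse = s.filter (fun j => decide (v < pvG dp j)) := by
  induction s using List.reverseRecOn with
  | nil => simp [pvPopTailAux]
  | append_singleton s' a ih =>
    rw [List.reverse_append]
    simp only [List.reverse_cons, List.reverse_nil, List.nil_append, List.singleton_append]
    rw [List.pairwise_append] at hp
    obtain ⟨hp', -, hall⟩ := hp
    have hGa : ∀ x ∈ s', pvG dp a < pvG dp x := fun x hx => hall x hx a (List.mem_singleton_self a)
    show (pvPopTailAux dp v (a :: s'.reverse)).reverse = _
    simp only [pvPopTailAux]
    by_cases hc : PySem.List.pyGetD dp a 0 ≤ v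
    · rw [if_pos hc, ih hp', List.filter_append]
      have : ¬ (v < pvG dp a) := by unfold pvG; omega
      simp [this]
    · rw [if_neg hc]
      have h1 : List.filter (fun j => decide (v < pvG dp j)) s' = s' :=
        List.filter_eq_self.mpr (fun x hx => by
          have := hGa x hx
          have : v < pvG dp x := by unfold pvG at *; omega
          simpa using this)
      have h2 : v < pvG dp a := by unfold pvG; omega
      simp [List.filter_append, h1, h2]

lemma pvSmx_append (dp dp' : List Int) (js : List Int) (t v : Int)
    (hagree : ∀ j ∈ js, pvG dp' j = pvG dp j) (ht : pvG dp' t = v) :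
    pvSmx dp' (js ++ [t]) = (pvSmx dp js).filter (fun j => decide (v < pvG dp j)) ++ [t] := by
  induction js with
  | nil => simp [pvSmx]
  | cons j rest ih =>
    have hagree' : ∀ x ∈ rest, pvG dp' x = pvG dp x := fun x hx => hagree x (List.mem_cons_of_mem j hx)
    have hj : pvG dp' j = pvG dp j := hagree j List.mem_cons_self
    have ihx := ih hagree'
    rw [List.cons_append]
    cases hF : (pvSmx dp rest).filter (fun x => decide (v < pvG dp x)) with
    | nil =>
      rw [hF, List.nil_append] at ihx
      rw [pvSmx_cons_cons dp' j t _ [] ihx, ht, hj]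
      cases hr : pvSmx dp rest with
      | nil =>
        have : rest = [] := (pvSmx_nil_iff dp rest).mp hr
        subst this
        rw [pvSmx_cons_nil dp j [] rfl, List.filter_cons]
        by_cases hvj : v < pvG dp j
        · simp [hvj]
        · simp [hvj]
      | cons m s =>
        have hm : ¬ (v < pvG dp m) := by
          intro hv
          rw [hr, List.filter_cons] at hF
          simp [hv] at hF
        rw [pvSmx_cons_cons dp j m rest s hr]
        rw [hr] at hF
        by_cases hmj : pvG dp m < pvG dp j
        · rw [if_pos hmj, List.filter_cons, hF]
          by_cases hvj : v < pvG dp j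
          · simp [hvj]
          · simp [hvj]
        · rw [if_neg hmj, if_neg (by omega), hF, List.nil_append]
    | cons f F' =>
      rw [hF] at ihx
      rw [pvSmx_cons_cons dp' j f _ (F' ++ [t]) (by rw [ihx]; simp)]
      have hfF : f ∈ (pvSmx dp rest).filter (fun x => decide (v < pvG dp x)) := by
        rw [hF]; exact List.mem_cons_self
      have hf_mem : f ∈ pvSmx dp rest := (List.mem_filter.mp hfF).1
      have hf_v : v < pvG dp f := by simpa using (List.mem_filter.mp hfF).2
      have hf_rest : f ∈ rest := (pvSmx_sublist dp rest).subset hf_mem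
      have hf' : pvG dp' f = pvG dp f := hagree' f hf_rest
      cases hr : pvSmx dp rest with
      | nil => rw [hr] at hf_mem; simp at hf_mem
      | cons m₀ s₀ =>
        have hfle : pvG dp f ≤ pvG dp m₀ := pvSmx_head_max dp rest m₀ s₀ hr f hf_rest
        have hv₀ : v < pvG dp m₀ := by omega
        rw [hr, List.filter_cons] at hF
        simp only [hv₀, decide_true, if_pos] at hF
        injection hF with h1 h2
        subst h1
        rw [pvSmx_cons_cons dp j m₀ rest s₀ hr, hf', hj]
        by_cases hc : pvG dp m₀ < pvG dp j
        · rw [if_pos hc, if_pos hc, List.filter_cons]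
          have hvj : v < pvG dp j := by omega
          simp only [hvj, decide_true, if_pos]
          rw [List.filter_cons]
          simp only [hv₀, decide_true, if_pos]
          rw [h2]
          simp
        · rw [if_neg hc, if_neg hc, List.filter_cons]
          simp only [hv₀, decide_true, if_pos]
          rw [h2]
          simp

lemma pvG_eq_getD (dp : List Int) (j : Int) (hj : 0 ≤ j) : pvG dp j = dp.getD j.toNat 0 := by
  unfold pvG
  rw [PySem.List.pyGetD_of_nonneg (h := hj)]

lemma pvG_set_ne (dp : List Int) (a : Nat) (v : Int) (x : Int) (hx : 0 ≤ x) (hne : x.toNat ≠ a) :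
    pvG (dp.set a v) x = pvG dp x := by
  rw [pvG_eq_getD _ _ hx, pvG_eq_getD _ _ hx]
  simp [List.getD_eq_getElem?_getD, List.getElem?_set_ne (Ne.symm hne)]

lemma pvG_set_self (dp : List Int) (a : Nat) (v : Int) (ha : a < dp.length) :
    pvG (dp.set a v) (a : Int) = v := by
  rw [pvG_eq_getD _ _ (by positivity)]
  simp [List.getD_eq_getElem?_getD, ha]

lemma pvMapWin (dp : List Int) : ∀ (n : Nat) (a b : Int), (b - a).toNat = n → 0 ≤ a → a ≤ b →
    b ≤ (dp.length : Int) →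
    (PySem.List.pyRange a b 1).map (pvG dp) = (dp.drop a.toNat).take (b - a).toNat := by
  intro n
  induction n with
  | zero =>
    intro a b hn ha hab hb
    have : a = b := by omega
    subst this
    rw [PySem.List.pyRange_one_eq_nil (by omega)]
    simp
  | succ n ih =>
    intro a b hn ha hab hb
    have hlt : a < b := by omega
    rw [PySem.List.pyRange_one_cons (by omega)]
    have hair : a.toNat < dp.length := by omega
    rw [List.drop_eq_getElem_cons hair]
    have h1 : (b - a).toNat = n + 1 := hn
    rw [h1, List.take_succ_cons, List.map_cons]
    congr 1
    · rw [pvG_eq_getD _ _ ha]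
      simp [List.getD_eq_getElem?_getD, List.getElem?_eq_getElem hair]
    · have := ih (a + 1) b (by omega) (by omega) (by omega) hb
      rw [this]
      have : (a + 1).toNat = a.toNat + 1 := by omega
      rw [this]
      congr 1
      omega

lemma pvAdvanceHead_drop (bound : Int) (dq : List Int) : ∀ (s : List Int) (h : Nat),
    dq.drop h = s → dq.drop (pvAdvanceHeadAux bound s h) = s.dropWhile (fun j => decide (j < bound)) := by
  intro s
  induction s with
  | nil => intro h hs; simp [pvAdvanceHeadAux, hs]
  | cons j rest ih =>
    intro h hs
    simp only [pvAdvanceHeadAux, List.dropWhile_cons]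
    by_cases hc : j < bound
    · rw [if_pos hc]
      simp only [hc, decide_true, if_pos]
      refine ih (h + 1) ?_
      have := congrArg List.tail hs
      simpa [List.tail_drop] using this
    · rw [if_neg hc]
      simp only [hc, decide_false]
      simpa using hs

lemma pvHead_read (dq : List Int) (h : Nat) (m : Int) (s : List Int) (hd : dq.drop h = m :: s) :
    PySem.List.pyGetD dq (h : Int) 0 = m ∧ h < dq.length := by
  have hlt : h < dq.length := by
    by_contra hge
    rw [List.drop_eq_nil_of_le (by omega)] at hd
    simp at hd
  constructor
  · rw [PySem.List.pyGetD_natCast]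
    have : dq[h]? = some m := by
      have := congrArg (fun l => l[0]?) hd
      simpa [List.getElem?_drop] using this
    simp [List.getD_eq_getElem?_getD, this]
  · exact hlt

lemma pvStep_max_eq (dp : List Int) (kc i : Int) (m : Int) (s : List Int)
    (h2 : 2 ≤ i) (hi : i ≤ (dp.length : Int)) (hk : 2 ≤ kc)
    (hsmx : pvSmx dp (pvWin (max 0 (i - kc)) (i - 1)) = m :: s) :
    pvG dp m = max (PySem.List.pyGetD dp (i - 1) 0)
      ((PySem.List.max? (PySem.List.slice dp (some (max 0 (i - kc))) (some (i - 1))) (fun x => x)).getD 0) := by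
  set w : Int := max 0 (i - kc) with hw
  have hw0 : 0 ≤ w := le_max_left _ _
  have hwle : w ≤ i - 2 := by omega
  have hslice : PySem.List.slice dp (some w) (some (i - 1)) = (dp.drop w.toNat).take ((i-1).toNat - w.toNat) :=
    PySem.List.slice_toNat dp hw0 (by omega)
  have htn : (i - 1).toNat - w.toNat = (i - 1 - w).toNat := by omega
  have hmapw : (PySem.List.pyRange w (i - 1) 1).map (pvG dp) = (dp.drop w.toNat).take (i - 1 - w).toNat :=
    pvMapWin dp (i - 1 - w).toNat w (i - 1) rfl hw0 (by omega) (by omega)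
  rw [htn, ← hmapw] at hslice
  -- pyRange w (i-1) is nonempty: head w, tail R
  have hcons : PySem.List.pyRange w (i - 1) 1 = w :: PySem.List.pyRange (w + 1) (i - 1) 1 :=
    PySem.List.pyRange_one_cons (by omega)
  set R := PySem.List.pyRange (w + 1) (i - 1) 1 with hR
  rw [hcons, List.map_cons] at hslice
  rw [hslice, PySem.List.max?_id_cons, Option.getD_some]
  set FM := (R.map (pvG dp)).foldl max (pvG dp w) with hFM
  have hub := PySem.List.le_foldl_max (R.map (pvG dp)) (pvG dp w)
  have hmem := PySem.List.foldl_max_mem (R.map (pvG dp)) (pvG dp w)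
  -- membership facts about the window
  have hwin : pvWin w (i - 1) = PySem.List.pyRange w (i - 1) 1 ++ [i - 1] := by
    unfold pvWin
    rw [PySem.List.pyRange_one_succ_right (by omega)]
  have hmwin : m ∈ pvWin w (i - 1) := (pvSmx_sublist dp _).subset (hsmx ▸ List.mem_cons_self)
  have hmax : ∀ j ∈ pvWin w (i - 1), pvG dp j ≤ pvG dp m := pvSmx_head_max dp _ m s hsmx
  -- A's value is an upper bound on the window
  have hAub : ∀ j ∈ pvWin w (i - 1), pvG dp j ≤ max (pvG dp (i - 1)) FM := by
    intro j hj
    rw [hwin, List.mem_append] at hj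
    rcases hj with hj | hj
    · rw [hcons, List.mem_cons] at hj
      rcases hj with rfl | hj
      · exact le_trans hub.1 (le_max_right _ _)
      · exact le_trans (hub.2 _ (List.mem_map_of_mem hj)) (le_max_right _ _)
    · simp at hj
      subst hj
      exact le_max_left _ _
  -- A's value is attained on the window
  have hAmem : ∃ j ∈ pvWin w (i - 1), pvG dp j = max (pvG dp (i - 1)) FM := by
    rcases max_choice (pvG dp (i - 1)) FM with hch | hch
    · exact ⟨i - 1, by rw [hwin]; simp, hch.symm⟩
    · rcases hmem with hfm | hfm
      · refine ⟨w, ?_, by omega⟩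
        rw [hwin, hcons]; simp
      · rcases List.mem_map.mp hfm with ⟨j, hj, hgj⟩
        refine ⟨j, ?_, by omega⟩
        rw [hwin, hcons]
        simp [hj]
  show pvG dp m = max (pvG dp (i - 1)) FM
  rcases hAmem with ⟨j, hjwin, hjv⟩
  have h1 : max (pvG dp (i - 1)) FM ≤ pvG dp m := hjv ▸ hmax j hjwin
  have h2 : pvG dp m ≤ max (pvG dp (i - 1)) FM := hAub m hmwin
  omega

lemma pvWin01 : pvWin 0 1 = [0, 1] := by decide

lemma pvInit (dp0 : List Int) :
    pvPopTail dp0 [0] 0 (PySem.List.pyGetD dp0 1 0) ++ [1] = pvSmx dp0 (pvWin 0 1) := by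
  rw [pvWin01]
  have h1 : pvSmx dp0 [(1 : Int)] = [1] := pvSmx_cons_nil dp0 1 [] rfl
  rw [pvSmx_cons_cons dp0 0 1 [1] [] h1]
  simp only [pvPopTail, List.take_zero, List.drop_zero, List.nil_append]
  by_cases h : PySem.List.pyGetD dp0 0 0 ≤ PySem.List.pyGetD dp0 1 0
  · rw [if_neg (by unfold pvG; omega)]
    simp [h, pvPopTailAux]
  · rw [if_pos (by unfold pvG; omega)]
    simp [h, pvPopTailAux]

lemma pvMain (profits : List Int) (kc : Int) (dp0 dq0 : List Int)
    (hdp0 : dp0.length = profits.length)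
    (hdq0 : dq0 = pvSmx dp0 (pvWin 0 1))
    (_hn : 3 ≤ profits.length) (hk : 2 ≤ kc) :
    ∀ (t : Nat) (i : Int), i = 2 + (t : Int) → i ≤ (profits.length : Int) →
    ((PySem.List.pyRange 2 i 1).foldl (pvStepB profits kc) (dp0, dq0, 0)).1
        = (PySem.List.pyRange 2 i 1).foldl (pvStepA profits kc) dp0
    ∧ ((PySem.List.pyRange 2 i 1).foldl (pvStepA profits kc) dp0).length = profits.length
    ∧ ((PySem.List.pyRange 2 i 1).foldl (pvStepB profits kc) (dp0, dq0, 0)).2.1.drop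
        ((PySem.List.pyRange 2 i 1).foldl (pvStepB profits kc) (dp0, dq0, 0)).2.2
        = pvSmx ((PySem.List.pyRange 2 i 1).foldl (pvStepA profits kc) dp0)
            (pvWin (max 0 (i - 1 - kc)) (i - 1)) := by
  intro t
  induction t with
  | zero =>
    intro i hi _
    have h2 : i = 2 := by omega
    subst h2
    rw [PySem.List.pyRange_one_eq_nil (by omega)]
    refine ⟨rfl, hdp0, ?_⟩
    have hmx : max 0 (2 - 1 - kc) = 0 := by omega
    rw [List.foldl_nil, List.foldl_nil, hmx]
    simpa using hdq0
  | succ t ih =>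
    intro i hi hin
    set j : Int := 2 + (t : Int) with hj
    have hij : i = j + 1 := by omega
    have h2j : 2 ≤ j := by omega
    have hjn : j < (profits.length : Int) := by omega
    obtain ⟨hBA, hlen, hdq⟩ := ih j rfl (by omega)
    have hpeel : PySem.List.pyRange 2 i 1 = PySem.List.pyRange 2 j 1 ++ [j] := by
      rw [hij]
      exact PySem.List.pyRange_one_succ_right (by omega)
    rw [hpeel, List.foldl_append, List.foldl_append]
    rcases hSB : ((PySem.List.pyRange 2 j 1).foldl (pvStepB profits kc) (dp0, dq0, 0)) with ⟨dpB, dqB, hB⟩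
    rw [hSB] at hBA hdq
    set dpA := (PySem.List.pyRange 2 j 1).foldl (pvStepA profits kc) dp0 with hdpA
    simp only at hBA hdq
    subst hBA
    set lo : Int := max 0 (j - 1 - kc) with hlo
    set lo' : Int := max 0 (j - kc) with hlo'
    set h' : Nat := pvAdvanceHead dqB (j - kc) hB with hh'
    have hmaxlo : max lo (j - kc) = lo' := by
      rw [hlo, hlo']
      omega
    have hdrop : dqB.drop h' = pvSmx dpA (pvWin lo' (j - 1)) := by
      rw [hh']
      unfold pvAdvanceHead
      rw [pvAdvanceHead_drop (j - kc) dqB (dqB.drop hB) hB rfl, hdq,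
        pvSmx_dropWhile dpA (j - kc) (j - 1) (j - lo).toNat lo (by omega), hmaxlo]
    have hlo'le : lo' ≤ j - 1 := by
      rw [hlo']; omega
    have hwincons : pvWin lo' (j - 1) = lo' :: pvWin (lo' + 1) (j - 1) := pvWin_cons _ _ hlo'le
    obtain ⟨m, s, hsm⟩ : ∃ m s, pvSmx dpA (pvWin lo' (j - 1)) = m :: s := by
      cases hx : pvSmx dpA (pvWin lo' (j - 1)) with
      | nil =>
        rw [pvSmx_nil_iff, hwincons] at hx
        simp at hx
      | cons a b => exact ⟨a, b, rfl⟩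
    have hread := pvHead_read dqB h' m s (hdrop.trans hsm)
    have hv : PySem.List.pyGetD dpA (PySem.List.pyGetD dqB (h' : Int) 0) 0
        = max (PySem.List.pyGetD dpA (j - 1) 0)
          ((PySem.List.max? (PySem.List.slice dpA (some (max 0 (j - kc))) (some (j - 1))) (fun x => x)).getD 0) := by
      rw [hread.1]
      exact pvStep_max_eq dpA kc j m s h2j (by omega) hk (by rw [← hlo']; exact hsm)
    set v : Int := PySem.List.pyGetD profits j 0 + PySem.List.pyGetD dpA (PySem.List.pyGetD dqB (h' : Int) 0) 0 with hvdef
    have hstepA : (List.foldl (pvStepA profits kc) dpA [j]) = dpA.set j.toNat v := by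
      simp only [List.foldl_cons, List.foldl_nil, pvStepA]
      rw [hvdef, hv]
    have hstepB : (List.foldl (pvStepB profits kc) (dpA, dqB, hB) [j])
        = (dpA.set j.toNat v, pvPopTail (dpA.set j.toNat v) dqB h' v ++ [j], h') := by
      simp only [List.foldl_cons, List.foldl_nil, pvStepB]
      rw [← hh', ← hvdef]
    rw [hstepA, hstepB]
    set dp' := dpA.set j.toNat v with hdp'
    have hjt : ((j.toNat : Nat) : Int) = j := by omega
    have hjlen : j.toNat < dpA.length := by
      have hx : dpA.length = profits.length := hlen
      omega
    have hagree : ∀ x ∈ pvWin lo' (j - 1), pvG dp' x = pvG dpA x := by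
      intro x hx
      have hb := PySem.List.mem_pyRange_one.mp hx
      exact pvG_set_ne dpA j.toNat v x (by omega) (by omega)
    have hGj : pvG dp' j = v := by
      rw [← hjt, hdp']
      exact pvG_set_self dpA j.toNat v hjlen
    refine ⟨rfl, by simp [hdp', hlen], ?_⟩
    have hpair : (m :: s).Pairwise (fun a b => pvG dp' b < pvG dp' a) := by
      have hp := pvSmx_pairwise dpA (pvWin lo' (j - 1))
      rw [hsm] at hp
      refine hp.imp_of_mem ?_
      intro a b ha hb hr
      have ha' : a ∈ pvWin lo' (j - 1) := (pvSmx_sublist dpA _).subset (hsm ▸ ha)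
      have hb' : b ∈ pvWin lo' (j - 1) := (pvSmx_sublist dpA _).subset (hsm ▸ hb)
      rw [hagree a ha', hagree b hb']
      exact hr
    have hfilter : (pvPopTailAux dp' v (dqB.drop h').reverse).reverse
        = (m :: s).filter (fun x => decide (v < pvG dp' x)) := by
      rw [hdrop.trans hsm]
      exact pvPopTailAux_eq_filter dp' v (m :: s) hpair
    have hfilter2 : (m :: s).filter (fun x => decide (v < pvG dp' x))
        = (pvSmx dpA (pvWin lo' (j - 1))).filter (fun x => decide (v < pvG dpA x)) := by
      rw [hsm]
      refine List.filter_congr ?_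
      intro x hx
      have hx' : x ∈ pvWin lo' (j - 1) := (pvSmx_sublist dpA _).subset (hsm ▸ hx)
      rw [hagree x hx']
    have happ : pvSmx dp' (pvWin lo' (j - 1) ++ [j])
        = (pvSmx dpA (pvWin lo' (j - 1))).filter (fun x => decide (v < pvG dpA x)) ++ [j] :=
      pvSmx_append dpA dp' (pvWin lo' (j - 1)) j v hagree hGj
    have hwinj : pvWin lo' (j - 1) ++ [j] = pvWin lo' j := by
      unfold pvWin
      have h1 : j - 1 + 1 = j := by omega
      rw [h1, PySem.List.pyRange_one_succ_right (by omega)]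
    simp only
    have hmx2 : max 0 (i - 1 - kc) = lo' := by rw [hlo']; omega
    have hi1 : i - 1 = j := by omega
    rw [hmx2, hi1, pvPopTail, List.append_assoc]
    have htake : (dqB.take h').length = h' := by
      rw [List.length_take]
      omega
    calc (dqB.take h' ++ ((pvPopTailAux dp' v (dqB.drop h').reverse).reverse ++ [j])).drop h'
        = (pvPopTailAux dp' v (dqB.drop h').reverse).reverse ++ [j] := List.drop_left' htake
      _ = pvSmx dp' (pvWin lo' j) := by
          rw [hfilter, hfilter2, ← happ, hwinj]

-- ===== VERDICT (by name: the statement is the Claim_ definition above) =====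
theorem maximize_profits_spec : Claim_equal_maximize_profits := by
  intro profits k _ hpre
  unfold Spec_maximize_profits
  simp only [maximize_profits, maximize_profits_alt]
  by_cases h2 : (profits.length : Int) ≤ 2
  · rw [if_pos h2, if_pos h2]
  · rw [if_neg h2, if_neg h2]
    have hn : 3 ≤ profits.length := by omega
    have hk2 : 2 ≤ min k ((profits.length : Int) - 1) := by
      rcases hpre with hl | hk
      · omega
      · omega
    set kc : Int := min k ((profits.length : Int) - 1) with hkc
    set dp0 : List Int := ((List.replicate profits.length 0).set 0 (PySem.List.pyGetD profits 0 0)).set 1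
        (PySem.List.pyGetD profits 0 0 + PySem.List.pyGetD profits 1 0) with hdp0def
    obtain ⟨h1, -, -⟩ := pvMain profits kc dp0
        (pvPopTail dp0 [0] 0 (PySem.List.pyGetD dp0 1 0) ++ [1])
        (by rw [hdp0def]; simp) (pvInit dp0) hn hk2
        (profits.length - 2) (profits.length : Int) (by omega) (le_refl _)
    rw [h1]
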